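-- pv_equiv track=rewrite | github.com/SalehDinparvar/sequence_computer | A188429.py | sequence_term
-- ===== SOURCE A (Python) =====
-- def range_n(n):  # returns set of 1 to n
--     n_list = []
--     for i in range(n):
--         n_list.append(i + 1)
--     return n_list
--
-- def subset(a_list):  # returns all subsets of a set, except null
--     result = []
--     n = len(a_list)
--     for i in range(2**n):
--         list2 = []
--         s = bin(i)
--         s = s[2:]
--         while len(s) < n:
--             s = "0"+s
--         for ii in range(len(s)):
--             if s[ii] == "1":
--                 list2.append(a_list[ii])
--         result.append(list2)
--     res = []
--     for i in result:
--         if len(i) > 0: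
--             res.append(i)
--     return res
--
-- def are_sets_equal(set_a, set_b):  # returns True if both given sets are equal
--     for i in set_a:
--         if i not in set_b:
--             return False
--     for i in set_b:
--         if i not in set_a:
--             return False
--     return True
--
-- def sum_of_subsets(a_set):  # returns the set of summation of all elements within all subsets of a set
--     r=[]
--     for i in subset(a_set):
--         r.append(sum(i))
--     return r
--
-- def nfull(n):  # returns set of all n-full sets for a given number
--     result = []
--     for i in subset(range_n(n//2+1)):  # omitting entries greater than [n/2]+1
--         if are_sets_equal(sum_of_subsets(i), range_n(n)):
--             result.append(i)
--     return result
--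
-- def sequence_term(n):  # returns the minimum of the set {max A: (sum A)=[n] }
--     max_nfull = []
--     for i in nfull(n):
--         max_nfull.append(max(i))
--     if len(max_nfull) == 0:
--         return 0
--     else:
--         return min(max_nfull)
-- ===== SOURCE B (Python) =====
-- def sequence_term(n):
--     # Same outer enumeration of subsets (msb-first masks), but each candidate's
--     # set of attainable subset sums is computed by an incremental DP instead of
--     # enumerating all its sub-subsets through binary strings.
--     m = n // 2 + 1
--     elems = list(range(1, m + 1))
--     target = set(range(1, n + 1))
--     L = len(elems)
--     best = None
--     for mask in range(1 << L):
--         sums = set()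
--         mx = None
--         for j in range(L):
--             if (mask >> (L - 1 - j)) & 1:
--                 x = elems[j]
--                 sums = sums | {s + x for s in sums} | {x}
--                 mx = x
--         if mx is not None and sums == target and (best is None or mx < best):
--             best = mx
--     return 0 if best is None else best
-- ===== Notes on version B (the rewrite author's own statement) =====
-- stated objective: alternative
-- what changed: For each candidate subset, B computes the attainable nonempty subset sums by an incremental subset-sum DP over a Python set (one pass per subset) instead of A's re-enumeration of all its sub-subsets via binary-string masks plus a quadratic list-membership comparison, and B keeps a running minimum of the maxima instead of materialising the list of n-full sets.
import Mathlib
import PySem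

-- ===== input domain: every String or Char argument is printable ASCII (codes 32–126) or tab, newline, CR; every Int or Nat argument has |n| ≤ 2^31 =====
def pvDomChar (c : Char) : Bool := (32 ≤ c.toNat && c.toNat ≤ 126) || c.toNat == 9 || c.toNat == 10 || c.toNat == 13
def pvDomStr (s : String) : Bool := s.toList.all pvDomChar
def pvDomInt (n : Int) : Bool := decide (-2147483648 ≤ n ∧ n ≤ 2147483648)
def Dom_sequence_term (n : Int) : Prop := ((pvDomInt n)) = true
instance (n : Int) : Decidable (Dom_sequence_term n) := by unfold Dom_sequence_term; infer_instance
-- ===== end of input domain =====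

-- B replaces A's per-subset enumeration of all sub-subsets (via binary strings) by an
-- incremental subset-sum DP over a Python set and a running minimum of the maxima
-- (objective: alternative).

-- ===== PORT A =====

-- range_n
def pvRangeN (n : Int) : List Int :=
  (PySem.List.pyRange 0 n 1).foldl (fun acc i => acc ++ [i + 1]) []

-- bin(i)[2:] for i > 0 (empty for 0): hand port of Python's bin, msb first; exact on Nat
def pvBinCore (i : Nat) : List Char :=
  if i = 0 then [] else pvBinCore (i / 2) ++ [if i % 2 = 1 then '1' else '0']

-- s = bin(i); s = s[2:]
def pvBin (i : Nat) : List Char := if i = 0 then ['0'] else pvBinCore i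

-- the while-loop: prepend '0' until length n
def pvPad (s : List Char) (n : Nat) : List Char :=
  if s.length < n then pvPad ('0' :: s) n else s
  termination_by n - s.length
  decreasing_by simp; omega

-- subset: s[ii] is always in range (ii < len s), so getD's default is never used;
-- a_list[ii] is only read at '1' positions, where ii < len a_list, so pyGetD's default is never used
def pvSubset (a_list : List Int) : List (List Int) :=
  let n := a_list.length
  let result := (List.range (2 ^ n)).foldl (fun res i =>
    let s := pvPad (pvBin i) n
    let list2 := (List.range s.length).foldl (fun l2 ii =>
      if s.getD ii ' ' = '1' then l2 ++ [PySem.List.pyGetD a_list (ii : Int) 0] else l2) []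
    res ++ [list2]) []
  result.foldl (fun res i => if 0 < i.length then res ++ [i] else res) []

def pvAreSetsEqual (set_a set_b : List Int) : Bool :=
  set_a.all (fun i => set_b.contains i) && set_b.all (fun i => set_a.contains i)

def pvSumOfSubsets (a_set : List Int) : List Int :=
  (pvSubset a_set).foldl (fun r i => r ++ [i.sum]) []

def pvNfull (n : Int) : List (List Int) :=
  (pvSubset (pvRangeN (PySem.Int.floordiv n 2 + 1))).foldl
    (fun res i => if pvAreSetsEqual (pvSumOfSubsets i) (pvRangeN n) then res ++ [i] else res) []

-- max(i) is only taken on nonempty lists (subset drops the empty one), so getD's default is never used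
def sequence_term (n : Int) : Int :=
  let max_nfull := (pvNfull n).foldl
    (fun acc i => acc ++ [(PySem.List.max? i (fun x => x)).getD 0]) []
  if max_nfull.length = 0 then 0
  else (PySem.List.min? max_nfull (fun x => x)).getD 0

-- ===== PORT B =====

-- sums | {s + x for s in sums} | {x}
def pvStepB (sums : PySem.Set Int) (x : Int) : PySem.Set Int :=
  PySem.Set.union (PySem.Set.union sums (PySem.Set.ofList (sums.map (fun s => s + x)))) [x]

def sequence_term_alt (n : Int) : Int :=
  let m := PySem.Int.floordiv n 2 + 1
  let elems := PySem.List.pyRange 1 (m + 1) 1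
  let target : PySem.Set Int := PySem.Set.ofList (PySem.List.pyRange 1 (n + 1) 1)
  let L := elems.length
  let best := (List.range (2 ^ L)).foldl (fun best mask =>
    let sm := (List.range L).foldl (fun (p : PySem.Set Int × Option Int) j =>
      if Nat.testBit mask (L - 1 - j) then
        let x := PySem.List.pyGetD elems (j : Int) 0
        (pvStepB p.1 x, some x)
      else p) (([] : PySem.Set Int), (none : Option Int))
    match sm.2 with
    | none => best
    | some mx =>
      if PySem.Set.equal sm.1 target then
        match best with
        | none => some mx
        | some b => if mx < b then some mx else best
      else best) (none : Option Int)
  match best with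
  | none => 0
  | some b => b

-- ===== PRECONDITION & SPEC =====
def Spec_sequence_term (n : Int) (out : Int) : Prop := out = sequence_term_alt n
instance (n : Int) (out : Int) : Decidable (Spec_sequence_term n out) := by unfold Spec_sequence_term; infer_instance

-- ===== CLAIM (what is proved, stated in full; the proofs are below) =====
def Claim_equal_sequence_term : Prop := ∀ (n : Int), Dom_sequence_term n → Spec_sequence_term n (sequence_term n)

-- ===== LEMMAS AND PROOFS =====

def sel (i : Nat) (l : List Int) : List Int :=
  ((List.range l.length).filter (fun j => i.testBit (l.length - 1 - j))).map (fun j => l.getD j 0)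

theorem sel_nil (i : Nat) : sel i [] = [] := rfl

theorem sel_cons (i : Nat) (x : Int) (l : List Int) :
    sel i (x :: l) = (if i.testBit l.length then [x] else []) ++ sel i l := by
  unfold sel
  rw [List.length_cons, List.range_succ_eq_map, List.filter_cons]
  have h0 : l.length + 1 - 1 - 0 = l.length := by omega
  rw [h0, List.filter_map]
  have h1 : (List.range l.length).filter ((fun j => i.testBit (l.length + 1 - 1 - j)) ∘ Nat.succ)
      = (List.range l.length).filter (fun j => i.testBit (l.length - 1 - j)) := by
    apply List.filter_congr
    intro j hj
    simp only [Function.comp]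
    have e : l.length + 1 - 1 - Nat.succ j = l.length - 1 - j := by omega
    rw [e]
  rw [h1]
  by_cases hb : i.testBit l.length
  · simp [hb, Function.comp, List.map_map]
  · simp [hb, Function.comp, List.map_map]

theorem sel_congr (i i' : Nat) (l : List Int)
    (h : ∀ k, k < l.length → i.testBit k = i'.testBit k) : sel i l = sel i' l := by
  unfold sel
  congr 1
  apply List.filter_congr
  intro j hj
  rw [List.mem_range] at hj
  rw [h _ (by omega)]

theorem sel_sublist (i : Nat) (l : List Int) : (sel i l).Sublist l := by
  induction l with
  | nil => simp [sel_nil]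
  | cons x t ih =>
    rw [sel_cons]
    by_cases hb : i.testBit t.length
    · simpa [hb] using ih.cons₂ x
    · simpa [hb] using ih.cons x

theorem sel_surj (t l : List Int) (h : t.Sublist l) :
    ∃ i, i < 2 ^ l.length ∧ sel i l = t := by
  induction l generalizing t with
  | nil =>
    rw [List.sublist_nil] at h
    exact ⟨0, by norm_num, by simp [h, sel_nil]⟩
  | cons x l ih =>
    rw [List.sublist_cons_iff] at h
    rcases h with h | ⟨r, rfl, hr⟩
    · obtain ⟨i, hi, hsel⟩ := ih t h
      refine ⟨i, by rw [List.length_cons]; calc i < 2 ^ l.length := hi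
        _ ≤ 2 ^ (l.length + 1) := Nat.pow_le_pow_right (by norm_num) (by omega), ?_⟩
      rw [sel_cons, Nat.testBit_lt_two_pow hi]
      simpa using hsel
    · obtain ⟨i, hi, hsel⟩ := ih r hr
      refine ⟨2 ^ l.length + i, by rw [List.length_cons]; omega, ?_⟩
      rw [sel_cons, Nat.testBit_two_pow_add_eq, Nat.testBit_lt_two_pow hi]
      have : sel (2 ^ l.length + i) l = sel i l := by
        apply sel_congr
        intro k hk
        exact Nat.testBit_two_pow_add_gt hk i
      simp [this, hsel]




def pvBits (i n : Nat) : List Char :=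
  (List.range n).map (fun ii => if i.testBit (n - 1 - ii) then '1' else '0')

theorem pvBits_zero (i : Nat) : pvBits i 0 = [] := rfl

theorem pvBits_succ (i n : Nat) :
    pvBits i (n + 1) = pvBits (i / 2) n ++ [if i % 2 = 1 then '1' else '0'] := by
  unfold pvBits
  rw [List.range_succ, List.map_append, List.map_singleton]
  congr 1
  · apply List.map_congr_left
    intro ii hii
    rw [List.mem_range] at hii
    have e : n + 1 - 1 - ii = (n - 1 - ii) + 1 := by omega
    rw [e, Nat.testBit_add_one]
  · have e : n + 1 - 1 - n = 0 := by omega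
    rw [e, Nat.testBit_zero]
    by_cases h : i % 2 = 1 <;> simp [h]

theorem pvPad_eq (s : List Char) (n : Nat) :
    pvPad s n = List.replicate (n - s.length) '0' ++ s := by
  by_cases h : s.length < n
  · rw [pvPad, if_pos h, pvPad_eq ('0' :: s) n]
    have e : n - s.length = (n - ('0' :: s).length) + 1 := by simp; omega
    rw [e, List.replicate_succ']
    simp
  · rw [pvPad, if_neg h]
    have e : n - s.length = 0 := by omega
    simp [e]
  termination_by n - s.length
  decreasing_by simp; omega

theorem binCore_bits (n : Nat) : ∀ i, i < 2 ^ n →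
    List.replicate (n - (pvBinCore i).length) '0' ++ pvBinCore i = pvBits i n := by
  induction n with
  | zero =>
    intro i hi
    interval_cases i
    simp [pvBinCore, pvBits_zero]
  | succ n ih =>
    intro i hi
    rw [pvBits_succ]
    by_cases h0 : i = 0
    · subst h0
      have : (0 : Nat) / 2 = 0 := by norm_num
      rw [← ih 0 (Nat.two_pow_pos n)]
      · simp [pvBinCore, List.replicate_succ']
    · rw [pvBinCore, if_neg h0]
      have hdiv : i / 2 < 2 ^ n := by
        rw [Nat.div_lt_iff_lt_mul (by norm_num)]
        calc i < 2 ^ (n + 1) := hi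
          _ = 2 ^ n * 2 := by ring
      rw [← ih (i / 2) hdiv]
      rw [List.length_append, List.length_singleton, ← List.append_assoc]
      congr 2
      congr 1
      omega

theorem pad_bin (n i : Nat) (hi : i < 2 ^ n) (hn : 0 < n) :
    pvPad (pvBin i) n = pvBits i n := by
  by_cases h0 : i = 0
  · subst h0
    rw [pvBin, if_pos rfl, pvPad_eq]
    have hb : pvBits 0 n = List.replicate n '0' := by
      simp [pvBits, Nat.zero_testBit, List.map_const']
    rw [hb]
    have e : n = (n - 1) + 1 := by omega
    conv_rhs => rw [e, List.replicate_succ']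
    simp
  · rw [pvBin, if_neg h0, pvPad_eq, binCore_bits n i hi]

theorem list2_eq_sel (l : List Int) (i : Nat) (hi : i < 2 ^ l.length) :
    (List.range (pvPad (pvBin i) l.length).length).foldl
      (fun l2 ii => if (pvPad (pvBin i) l.length).getD ii ' ' = '1'
        then l2 ++ [PySem.List.pyGetD l (ii : Int) 0] else l2) [] = sel i l := by
  rcases Nat.eq_zero_or_pos l.length with hn | hn
  · have hl : l = [] := List.length_eq_zero_iff.mp hn
    subst hl
    have h0 : i = 0 := by simpa using hi
    subst h0
    rw [pvPad_eq]
    simp [pvBin, sel, List.range_succ]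
  · rw [pad_bin l.length i hi hn]
    have hlen : (pvBits i l.length).length = l.length := by simp [pvBits]
    rw [hlen]
    have key := PySem.List.foldl_append_if
      (fun ii => decide ((pvBits i l.length).getD ii ' ' = '1'))
      (fun ii => PySem.List.pyGetD l (ii : Int) 0) (List.range l.length) []
    simp only [decide_eq_true_eq] at key
    rw [key, List.nil_append]
    unfold sel
    have hfe : (List.range l.length).filter
        (fun ii => decide ((pvBits i l.length).getD ii ' ' = '1'))
        = (List.range l.length).filter (fun j => i.testBit (l.length - 1 - j)) := by
      apply List.filter_congr
      intro j hj
      rw [List.mem_range] at hj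
      have hg : (pvBits i l.length).getD j ' ' = if i.testBit (l.length - 1 - j) then '1' else '0' := by
        rw [List.getD_eq_getElem?_getD]
        simp [pvBits, hj]
      rw [hg]
      by_cases hb : i.testBit (l.length - 1 - j) <;> simp [hb]
    rw [hfe]
    apply List.map_congr_left
    intro j hj
    exact PySem.List.pyGetD_natCast l j 0

theorem subset_eq (l : List Int) :
    pvSubset l = ((List.range (2 ^ l.length)).map (fun i => sel i l)).filter
      (fun t => decide (0 < t.length)) := by
  unfold pvSubset
  dsimp only
  have k1 := PySem.List.foldl_append_singleton_eq_map
    (fun i => (List.range (pvPad (pvBin i) l.length).length).foldl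
      (fun l2 ii => if (pvPad (pvBin i) l.length).getD ii ' ' = '1'
        then l2 ++ [PySem.List.pyGetD l (ii : Int) 0] else l2) [])
    (List.range (2 ^ l.length)) []
  rw [k1, List.nil_append]
  have k2 := PySem.List.foldl_append_if (fun (t : List Int) => decide (0 < t.length))
    (fun t => t)
    ((List.range (2 ^ l.length)).map (fun i => (List.range (pvPad (pvBin i) l.length).length).foldl
      (fun l2 ii => if (pvPad (pvBin i) l.length).getD ii ' ' = '1'
        then l2 ++ [PySem.List.pyGetD l (ii : Int) 0] else l2) [])) []
  simp only [decide_eq_true_eq] at k2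
  rw [List.map_id'] at k2
  rw [k2, List.nil_append]
  congr 1
  apply List.map_congr_left
  intro i hi
  rw [List.mem_range] at hi
  exact list2_eq_sel l i hi

theorem mem_pvSubset (l t : List Int) :
    t ∈ pvSubset l ↔ t.Sublist l ∧ t ≠ [] := by
  rw [subset_eq]
  simp only [List.mem_filter, List.mem_map, List.mem_range, decide_eq_true_eq]
  constructor
  · rintro ⟨⟨i, hi, rfl⟩, hpos⟩
    refine ⟨sel_sublist i l, ?_⟩
    intro h
    rw [h] at hpos
    simp at hpos
  · rintro ⟨hsub, hne⟩
    obtain ⟨i, hi, hsel⟩ := sel_surj t l hsub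
    refine ⟨⟨i, hi, hsel⟩, ?_⟩
    cases t with
    | nil => exact absurd rfl hne
    | cons a s => simp

theorem mem_pvSumOfSubsets (S : List Int) (v : Int) :
    v ∈ pvSumOfSubsets S ↔ ∃ t, t.Sublist S ∧ t ≠ [] ∧ v = t.sum := by
  unfold pvSumOfSubsets
  rw [PySem.List.foldl_append_singleton_eq_map (fun (i : List Int) => i.sum) (pvSubset S) []]
  simp only [List.nil_append, List.mem_map]
  constructor
  · rintro ⟨u, hu, rfl⟩
    have h := (mem_pvSubset S u).mp hu
    exact ⟨u, h.1, h.2, rfl⟩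
  · rintro ⟨t, h1, h2, rfl⟩
    exact ⟨t, (mem_pvSubset S t).mpr ⟨h1, h2⟩, rfl⟩

theorem mem_pvStepB (s : PySem.Set Int) (x v : Int) :
    v ∈ pvStepB s x ↔ v ∈ s ∨ (∃ u ∈ s, v = u + x) ∨ v = x := by
  unfold pvStepB
  rw [PySem.Set.mem_union, PySem.Set.mem_union, PySem.Set.mem_ofList]
  simp only [List.mem_map, List.mem_singleton]
  constructor
  · rintro (⟨h | ⟨u, hu, rfl⟩⟩ | h)
    · exact Or.inl h
    · exact Or.inr (Or.inl ⟨u, hu, rfl⟩)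
    · exact Or.inr (Or.inr h)
  · rintro (h | ⟨u, hu, rfl⟩ | h)
    · exact Or.inl (Or.inl h)
    · exact Or.inl (Or.inr ⟨u, hu, rfl⟩)
    · exact Or.inr h

theorem mem_foldl_pvStepB (t : List Int) : ∀ (s0 : PySem.Set Int) (v : Int),
    v ∈ t.foldl pvStepB s0 ↔ v ∈ s0 ∨
      ∃ t', t'.Sublist t ∧ t' ≠ [] ∧ (v = t'.sum ∨ ∃ u ∈ s0, v = u + t'.sum) := by
  induction t with
  | nil =>
    intro s0 v
    simp only [List.foldl_nil, List.sublist_nil]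
    constructor
    · exact Or.inl
    · rintro (h | ⟨t', ht', hne, _⟩)
      · exact h
      · exact absurd ht' hne
  | cons x t ih =>
    intro s0 v
    rw [List.foldl_cons, ih]
    constructor
    · rintro (hs | ⟨t', hsub, hne, hv⟩)
      · rw [mem_pvStepB] at hs
        rcases hs with h | ⟨u, hu, huv⟩ | hvx
        · exact Or.inl h
        · exact Or.inr ⟨[x], (List.nil_sublist t).cons₂ x, by simp,
            Or.inr ⟨u, hu, by simpa using huv⟩⟩
        · exact Or.inr ⟨[x], (List.nil_sublist t).cons₂ x, by simp, Or.inl (by simpa using hvx)⟩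
      · rcases hv with rfl | ⟨u, hu, huv⟩
        · exact Or.inr ⟨t', hsub.cons x, hne, Or.inl rfl⟩
        · rw [mem_pvStepB] at hu
          rcases hu with h | ⟨w, hw, hwu⟩ | hux
          · exact Or.inr ⟨t', hsub.cons x, hne, Or.inr ⟨u, h, huv⟩⟩
          · exact Or.inr ⟨x :: t', hsub.cons₂ x, by simp,
              Or.inr ⟨w, hw, by rw [huv, hwu, List.sum_cons]; ring⟩⟩
          · exact Or.inr ⟨x :: t', hsub.cons₂ x, by simp,
              Or.inl (by rw [huv, hux, List.sum_cons])⟩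
    · rintro (hs | ⟨t', hsub, hne, hv⟩)
      · exact Or.inl (by rw [mem_pvStepB]; exact Or.inl hs)
      · rw [List.sublist_cons_iff] at hsub
        rcases hsub with hsub | ⟨r, rfl, hr⟩
        · rcases hv with rfl | ⟨u, hu, huv⟩
          · exact Or.inr ⟨t', hsub, hne, Or.inl rfl⟩
          · exact Or.inr ⟨t', hsub, hne, Or.inr ⟨u, by rw [mem_pvStepB]; exact Or.inl hu, huv⟩⟩
        · rcases hv with rfl | ⟨u, hu, huv⟩
          · rcases List.eq_nil_or_concat r with rfl | hrne
            · exact Or.inl (by rw [mem_pvStepB]; exact Or.inr (Or.inr (by simp)))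
            · have hrne' : r ≠ [] := by rintro rfl; rcases hrne with ⟨a, b, hab⟩; simp at hab
              exact Or.inr ⟨r, hr, hrne',
                Or.inr ⟨x, by rw [mem_pvStepB]; exact Or.inr (Or.inr rfl), by rw [List.sum_cons]⟩⟩
          · rcases List.eq_nil_or_concat r with rfl | hrne
            · refine Or.inl ?_
              rw [mem_pvStepB]
              exact Or.inr (Or.inl ⟨u, hu, by rw [huv]; simp⟩)
            · have hrne' : r ≠ [] := by rintro rfl; rcases hrne with ⟨a, b, hab⟩; simp at hab
              refine Or.inr ⟨r, hr, hrne',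
                Or.inr ⟨u + x, by rw [mem_pvStepB]; exact Or.inr (Or.inl ⟨u, hu, rfl⟩), ?_⟩⟩
              rw [huv, List.sum_cons]; ring

def optMin (b : Option Int) (v : Int) : Option Int :=
  match b with
  | none => some v
  | some b0 => if v < b0 then some v else some b0

theorem foldl_pair (t : List Int) : ∀ (s0 : PySem.Set Int) (m0 : Option Int),
    t.foldl (fun (p : PySem.Set Int × Option Int) x => (pvStepB p.1 x, some x)) (s0, m0)
      = (t.foldl pvStepB s0, t.getLast?.or m0) := by
  induction t with
  | nil => intro s0 m0; simp
  | cons x t ih =>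
    intro s0 m0
    rw [List.foldl_cons, List.foldl_cons, ih]
    cases t with
    | nil => simp
    | cons y s =>
      rw [List.getLast?_cons_cons]
      have hne : (y :: s).getLast? ≠ none := by simp
      cases hg : (y :: s).getLast? with
      | none => exact absurd hg hne
      | some z => simp [Option.or]

theorem pairwise_le_getLast (l : List Int) (h : l.Pairwise (· < ·)) (hne : l ≠ []) :
    ∀ y ∈ l, y ≤ l.getLast hne := by
  induction l with
  | nil => exact absurd rfl hne
  | cons x t ih =>
    intro y hy
    rcases List.mem_cons.mp hy with rfl | hyt
    · cases t with
      | nil => simp [List.getLast]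
      | cons a s =>
        rw [List.getLast_cons (by simp)]
        have hlt : y < (a :: s).getLast (by simp) :=
          (List.pairwise_cons.mp h).1 _ (List.getLast_mem _)
        exact le_of_lt hlt
    · cases t with
      | nil => simp at hyt
      | cons a s =>
        rw [List.getLast_cons (by simp)]
        exact ih (List.pairwise_cons.mp h).2 (by simp) y hyt

theorem max?_eq_getLast? (l : List Int) (h : l.Pairwise (· < ·)) :
    PySem.List.max? l (fun x => x) = l.getLast? := by
  cases l with
  | nil => rfl
  | cons x t =>
    rw [PySem.List.max?_id_cons]
    have hne : x :: t ≠ [] := by simp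
    rw [List.getLast?_eq_some_getLast hne]
    congr 1
    have hmem := PySem.List.foldl_max_mem t x
    have hmax := PySem.List.le_foldl_max t x
    have hle : ∀ y ∈ x :: t, y ≤ (x :: t).getLast hne := pairwise_le_getLast _ h hne
    have h1 : List.foldl max x t ≤ (x :: t).getLast hne := by
      rcases hmem with he | hm
      · rw [he]; exact hle x (by simp)
      · exact hle _ (by simp [hm])
    have h2 : (x :: t).getLast hne ≤ List.foldl max x t := by
      rcases List.mem_cons.mp (List.getLast_mem hne) with he | hm
      · rw [he]; exact hmax.1
      · exact hmax.2 _ hm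
    exact le_antisymm h1 h2

theorem foldl_optMin_some (t : List Int) : ∀ a : Int,
    t.foldl optMin (some a) = some (t.foldl min a) := by
  induction t with
  | nil => intro a; rfl
  | cons x t ih =>
    intro a
    rw [List.foldl_cons, List.foldl_cons]
    have : optMin (some a) x = some (min a x) := by
      unfold optMin
      show (if x < a then some x else some a) = some (min a x)
      rw [min_def]
      by_cases hx : x < a
      · rw [if_pos hx, if_neg (by omega)]
      · rw [if_neg hx, if_pos (by omega)]
    rw [this, ih]

theorem pvRangeN_eq (k : Int) : pvRangeN k = PySem.List.pyRange 1 (k + 1) 1 := by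
  unfold pvRangeN
  rw [PySem.List.foldl_append_singleton_eq_map (fun i => i + 1) (PySem.List.pyRange 0 k 1) []]
  rw [List.nil_append, PySem.List.pyRange_one, PySem.List.pyRange_one, List.map_map]
  have e1 : (k - 0).toNat = (k + 1 - 1).toNat := by omega
  rw [e1]
  apply List.map_congr_left
  intro j hj
  simp
  omega

theorem mem_pvRangeN (k x : Int) : x ∈ pvRangeN k ↔ 1 ≤ x ∧ x < k + 1 := by
  rw [pvRangeN_eq]
  exact PySem.List.mem_pyRange_one

theorem test_eq (n : Int) (S : List Int) :
    pvAreSetsEqual (pvSumOfSubsets S) (pvRangeN n)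
      = PySem.Set.equal (S.foldl pvStepB ([] : PySem.Set Int))
          (PySem.Set.ofList (PySem.List.pyRange 1 (n + 1) 1)) := by
  have hmemB : ∀ v : Int, v ∈ S.foldl pvStepB ([] : PySem.Set Int)
      ↔ ∃ t, t.Sublist S ∧ t ≠ [] ∧ v = t.sum := by
    intro v
    rw [mem_foldl_pvStepB]
    simp only [List.not_mem_nil, false_or, false_and, exists_false, or_false]
  have hA : pvAreSetsEqual (pvSumOfSubsets S) (pvRangeN n) = true
      ↔ ∀ v : Int, (∃ t, t.Sublist S ∧ t ≠ [] ∧ v = t.sum) ↔ (1 ≤ v ∧ v < n + 1) := by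
    unfold pvAreSetsEqual
    rw [Bool.and_eq_true, List.all_eq_true, List.all_eq_true]
    constructor
    · rintro ⟨h1, h2⟩ v
      constructor
      · intro hv
        have := h1 v ((mem_pvSumOfSubsets S v).mpr hv)
        rw [List.contains_iff_mem, mem_pvRangeN] at this
        exact this
      · intro hv
        have := h2 v ((mem_pvRangeN n v).mpr hv)
        rw [List.contains_iff_mem, mem_pvSumOfSubsets] at this
        exact this
    · intro h
      constructor
      · intro v hv
        rw [List.contains_iff_mem, mem_pvRangeN]
        exact (h v).mp ((mem_pvSumOfSubsets S v).mp hv)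
      · intro v hv
        rw [List.contains_iff_mem, mem_pvSumOfSubsets]
        exact (h v).mpr ((mem_pvRangeN n v).mp hv)
  have hB : PySem.Set.equal (S.foldl pvStepB ([] : PySem.Set Int))
        (PySem.Set.ofList (PySem.List.pyRange 1 (n + 1) 1)) = true
      ↔ ∀ v : Int, (∃ t, t.Sublist S ∧ t ≠ [] ∧ v = t.sum) ↔ (1 ≤ v ∧ v < n + 1) := by
    rw [PySem.Set.equal_iff]
    constructor
    · intro h v
      rw [← hmemB v, h v, PySem.Set.mem_ofList, PySem.List.mem_pyRange_one]
    · intro h v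
      rw [hmemB v, PySem.Set.mem_ofList, PySem.List.mem_pyRange_one]
      exact h v
  have : (pvAreSetsEqual (pvSumOfSubsets S) (pvRangeN n) = true)
      ↔ (PySem.Set.equal (S.foldl pvStepB ([] : PySem.Set Int))
          (PySem.Set.ofList (PySem.List.pyRange 1 (n + 1) 1)) = true) := by
    rw [hA, hB]
  exact Bool.coe_iff_coe.mp this

theorem main_eq (n : Int) : sequence_term n = sequence_term_alt n := by
  have hm : pvRangeN (PySem.Int.floordiv n 2 + 1)
      = PySem.List.pyRange (1 : Int) (PySem.Int.floordiv n 2 + 1 + 1) 1 := pvRangeN_eq _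
  set elems : List Int := PySem.List.pyRange (1 : Int) (PySem.Int.floordiv n 2 + 1 + 1) 1 with helems
  set P : Nat → Bool := fun i =>
    pvAreSetsEqual (pvSumOfSubsets (sel i elems)) (pvRangeN n) &&
      decide (0 < (sel i elems).length) with hP
  set f : Nat → Int := fun i => (PySem.List.max? (sel i elems) (fun x => x)).getD 0 with hf
  set M : List Int := ((List.range (2 ^ elems.length)).filter P).map f with hM
  have hA : sequence_term n
      = if M.length = 0 then 0 else (PySem.List.min? M (fun x => x)).getD 0 := by
    unfold sequence_term pvNfull
    rw [hm]
    have k1 := PySem.List.foldl_append_if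
      (fun i => pvAreSetsEqual (pvSumOfSubsets i) (pvRangeN n))
      (fun (i : List Int) => i) (pvSubset elems) []
    rw [List.map_id'] at k1
    rw [k1, List.nil_append, subset_eq, List.filter_filter]
    rw [List.filter_map]
    rw [PySem.List.foldl_append_singleton_eq_map
      (fun (i : List Int) => (PySem.List.max? i (fun x => x)).getD 0) _ []]
    rw [List.nil_append, List.map_map]
    rfl
  have hpair : ∀ mask : Nat,
      (List.range elems.length).foldl (fun (p : PySem.Set Int × Option Int) j =>
        if Nat.testBit mask (elems.length - 1 - j) then
          (pvStepB p.1 (PySem.List.pyGetD elems (j : Int) 0),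
            some (PySem.List.pyGetD elems (j : Int) 0))
        else p) (([] : PySem.Set Int), (none : Option Int))
      = ((sel mask elems).foldl pvStepB ([] : PySem.Set Int), (sel mask elems).getLast?) := by
    intro mask
    have e1 : (fun (p : PySem.Set Int × Option Int) (j : Nat) =>
        if Nat.testBit mask (elems.length - 1 - j) then
          (pvStepB p.1 (PySem.List.pyGetD elems (j : Int) 0),
            some (PySem.List.pyGetD elems (j : Int) 0))
        else p)
        = (fun (p : PySem.Set Int × Option Int) (j : Nat) =>
            if Nat.testBit mask (elems.length - 1 - j) = true then
              (pvStepB p.1 (elems.getD j 0), some (elems.getD j 0)) else p) := by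
      funext p j
      rw [PySem.List.pyGetD_natCast]
    rw [e1]
    rw [← List.foldl_filter (p := fun j => Nat.testBit mask (elems.length - 1 - j))
      (f := fun (p : PySem.Set Int × Option Int) j =>
        (pvStepB p.1 (elems.getD j 0), some (elems.getD j 0)))]
    rw [← List.foldl_map (f := fun j => elems.getD j 0)
      (g := fun (p : PySem.Set Int × Option Int) x => (pvStepB p.1 x, some x))]
    rw [show ((List.range elems.length).filter
        (fun j => Nat.testBit mask (elems.length - 1 - j))).map (fun j => elems.getD j 0)
      = sel mask elems from rfl]
    rw [foldl_pair]
    simp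
  have hbody : ∀ (best : Option Int) (mask : Nat),
      (match ((sel mask elems).foldl pvStepB ([] : PySem.Set Int),
          (sel mask elems).getLast?).2 with
        | none => best
        | some mx =>
          if PySem.Set.equal ((sel mask elems).foldl pvStepB ([] : PySem.Set Int),
              (sel mask elems).getLast?).1
              (PySem.Set.ofList (PySem.List.pyRange 1 (n + 1) 1)) then
            match best with
            | none => some mx
            | some b => if mx < b then some mx else best
          else best)
      = if P mask then optMin best (f mask) else best := by
    intro best mask
    dsimp only
    cases hsel : sel mask elems with
    | nil =>
      have hp : P mask = false := by
        rw [hP]; simp [hsel]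
      rw [hp]
      simp
    | cons y s =>
      have hpw : (sel mask elems).Pairwise (· < ·) :=
        List.Pairwise.sublist (sel_sublist mask elems) (PySem.List.pairwise_lt_pyRange_one _ _)
      have hmax : PySem.List.max? (sel mask elems) (fun x => x) = (sel mask elems).getLast? :=
        max?_eq_getLast? _ hpw
      have hq := test_eq n (sel mask elems)
      rw [hsel] at hq hmax
      have hlast : (y :: s).getLast? = some ((y :: s).getLast (by simp)) :=
        List.getLast?_eq_some_getLast (by simp)
      rw [hlast]
      dsimp only
      by_cases he : PySem.Set.equal ((y :: s).foldl pvStepB ([] : PySem.Set Int))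
          (PySem.Set.ofList (PySem.List.pyRange 1 (n + 1) 1)) = true
      · have hp : P mask = true := by
          rw [hP]; dsimp only; rw [hsel, hq, he]; simp
        rw [hp, if_pos rfl, if_pos he]
        have hfv : f mask = (y :: s).getLast (by simp) := by
          rw [hf]; dsimp only; rw [hsel, hmax, hlast]; rfl
        rw [hfv]
        cases best with
        | none => rfl
        | some b => rfl
      · have hp : P mask = false := by
          rw [hP]; dsimp only; rw [hsel, hq]
          simp only [Bool.and_eq_false_iff]
          exact Or.inl (Bool.eq_false_iff.mpr he)
        rw [hp, if_neg he]
        simp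
  have hB : sequence_term_alt n
      = match M.foldl optMin none with | none => 0 | some b => b := by
    unfold sequence_term_alt
    dsimp only
    rw [← helems]
    have hfold : (List.range (2 ^ elems.length)).foldl (fun best mask =>
        match ((List.range elems.length).foldl (fun (p : PySem.Set Int × Option Int) j =>
          if Nat.testBit mask (elems.length - 1 - j) then
            (pvStepB p.1 (PySem.List.pyGetD elems (j : Int) 0),
              some (PySem.List.pyGetD elems (j : Int) 0))
          else p) (([] : PySem.Set Int), (none : Option Int))).2 with
        | none => best
        | some mx =>
          if PySem.Set.equal ((List.range elems.length).foldl
              (fun (p : PySem.Set Int × Option Int) j =>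
              if Nat.testBit mask (elems.length - 1 - j) then
                (pvStepB p.1 (PySem.List.pyGetD elems (j : Int) 0),
                  some (PySem.List.pyGetD elems (j : Int) 0))
              else p) (([] : PySem.Set Int), (none : Option Int))).1
              (PySem.Set.ofList (PySem.List.pyRange 1 (n + 1) 1)) then
            match best with
            | none => some mx
            | some b => if mx < b then some mx else best
          else best) none
        = M.foldl optMin none := by
      have step1 : ∀ (best : Option Int) (mask : Nat), mask ∈ List.range (2 ^ elems.length) →
          (match ((List.range elems.length).foldl (fun (p : PySem.Set Int × Option Int) j =>
            if Nat.testBit mask (elems.length - 1 - j) then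
              (pvStepB p.1 (PySem.List.pyGetD elems (j : Int) 0),
                some (PySem.List.pyGetD elems (j : Int) 0))
            else p) (([] : PySem.Set Int), (none : Option Int))).2 with
          | none => best
          | some mx =>
            if PySem.Set.equal ((List.range elems.length).foldl
                (fun (p : PySem.Set Int × Option Int) j =>
                if Nat.testBit mask (elems.length - 1 - j) then
                  (pvStepB p.1 (PySem.List.pyGetD elems (j : Int) 0),
                    some (PySem.List.pyGetD elems (j : Int) 0))
                else p) (([] : PySem.Set Int), (none : Option Int))).1
                (PySem.Set.ofList (PySem.List.pyRange 1 (n + 1) 1)) then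
              match best with
              | none => some mx
              | some b => if mx < b then some mx else best
            else best)
          = if P mask then optMin best (f mask) else best := by
        intro best mask _
        rw [hpair mask]
        exact hbody best mask
      rw [List.foldl_ext _ _ _ step1]
      rw [← List.foldl_filter (p := P) (f := fun b i => optMin b (f i))]
      rw [← List.foldl_map (f := f) (g := optMin)]
    rw [hfold]
  rw [hA, hB]
  cases hMc : M with
  | nil => simp
  | cons x t =>
    rw [if_neg (by simp), PySem.List.min?_id_cons]
    have h1 : (x :: t).foldl optMin none = t.foldl optMin (some x) := rfl
    rw [h1, foldl_optMin_some]
    rfl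


-- ===== VERDICT (by name: the statement is the Claim_ definition above) =====
theorem sequence_term_spec : Claim_equal_sequence_term := by
  intro n _
  exact main_eq n
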